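-- pv_equiv track=rewrite | github.com/rackjoobee/smartversion | smartversion/tuple_smartversion.py | find_pns
-- ===== SOURCE A (Python) =====
-- import string
--
-- NAME_SEPS = ['-V', '-v', '-R', '-r', '_V', '_v', '_R', '_r', ' V', ' v', ' R', ' r', '/R', '/r', '/V', '/v', ' ', '-', '_', '/']
--
-- def next_digit_offset(s, start_offset=0):
--     """Given an optional start offset, find the offset of the
--        next digit character in string s, or -1.
--     """
--     s_len = len(s)
--     for i in range(start_offset, s_len):
--         if s[i] in string.digits:
--             return i
--     return -1
--
-- def find_pns(s, start_offset, have_pns):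
--     """Find a package name separator in a string, or ''"""
--     s_len   = len(s)
--     sep_len = 1
--     # Find first digit
--     i = start_offset
--     i -= 1
--     # Move back one more if v_ersion or r_elease
--     if s[i].lower() in ['v', 'r']:
--         i -= 1
--         sep_len += 1
--     # Return string
--     sep = s[i:i+sep_len]
--     if sep not in NAME_SEPS:
--         if have_pns:
--             ndo_start = i+sep_len+1
--             if ndo_start >= s_len:
--                 return ''
--             ndo = next_digit_offset(s, ndo_start)
--             if ndo == -1 or ndo >= s_len:
--                 return ''
--             else:
--                 return find_pns(s, ndo, have_pns)
--         elif sep == '.':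
--             # Handle case "sendmail.8.14.x". We don't want '.' in NAME_SEPS
--             # though - that makes the have_pns check worthless, since '.'
--             # is usually version_sep
--             return sep
--         else:
--             # Handle edge case where form is "ProFTPD1.3.3" or so
--             return ''
--     else:
--         return sep
-- ===== SOURCE B (Python) =====
-- import string
--
-- NAME_SEPS = ['-V', '-v', '-R', '-r', '_V', '_v', '_R', '_r', ' V', ' v', ' R', ' r', '/R', '/r', '/V', '/v', ' ', '-', '_', '/']
--
-- def next_digit_offset(s, start_offset=0):
--     """Offset of the next digit character at or after start_offset, or -1."""
--     return next((i for i in range(start_offset, len(s)) if s[i] in string.digits), -1)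
--
-- def find_pns(s, start_offset, have_pns):
--     """Find a package name separator in a string, or ''"""
--     s_len = len(s)
--     while True:
--         i = start_offset - 1
--         sep_len = 1
--         if s[i].lower() in ('v', 'r'):
--             i -= 1
--             sep_len = 2
--         sep = s[i:i + sep_len]
--         if sep in NAME_SEPS:
--             return sep
--         if not have_pns:
--             return sep if sep == '.' else ''
--         ndo_start = i + sep_len + 1
--         if ndo_start >= s_len:
--             return ''
--         ndo = next_digit_offset(s, ndo_start)
--         if ndo == -1 or ndo >= s_len:
--             return ''
--         start_offset = ndo
-- ===== Notes on version B (the rewrite author's own statement) =====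
-- stated objective: alternative
-- what changed: A's tail recursion is replaced by an iterative while-True loop that threads start_offset forward with early returns (separator-hit check first), and the next-digit scan is written as next() over a generator instead of an explicit indexed for-loop.
import Mathlib
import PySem

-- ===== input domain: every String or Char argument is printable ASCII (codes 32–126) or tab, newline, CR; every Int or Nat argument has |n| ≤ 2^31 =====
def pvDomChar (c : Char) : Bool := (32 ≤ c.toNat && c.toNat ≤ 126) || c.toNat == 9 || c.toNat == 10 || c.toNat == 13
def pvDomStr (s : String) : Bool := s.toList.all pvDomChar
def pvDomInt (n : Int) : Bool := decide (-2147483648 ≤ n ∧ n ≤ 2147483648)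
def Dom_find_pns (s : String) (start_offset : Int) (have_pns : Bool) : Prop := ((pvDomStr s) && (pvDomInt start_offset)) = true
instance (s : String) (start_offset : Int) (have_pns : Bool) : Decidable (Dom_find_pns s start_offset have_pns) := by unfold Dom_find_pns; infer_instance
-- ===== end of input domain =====

-- B rewrites A's tail recursion as an iterative while-True loop threading start_offset forward (objective: alternative decomposition, same cost).
-- Both ports work on List Char (per PYSEM.md); find_pns/find_pns_alt are thin String wrappers.
-- Both recursions carry a fuel guard (2*len+2, enough since the offset strictly increases and is bounded by len(s)).

-- ===== PORT A =====
def pvNameSeps : List (List Char) :=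
  [['-','V'], ['-','v'], ['-','R'], ['-','r'], ['_','V'], ['_','v'], ['_','R'], ['_','r'],
   [' ','V'], [' ','v'], [' ','R'], [' ','r'], ['/','R'], ['/','r'], ['/','V'], ['/','v'],
   [' '], ['-'], ['_'], ['/']]

def pvDigits : List Char := ['0','1','2','3','4','5','6','7','8','9']

-- A's next_digit_offset: the for-loop with early return, transliterated as recursion over the range
def pvNdoLoopA (s : List Char) (is : List Int) : Int :=
  match is with
  | [] => -1
  | i :: rest =>
    match PySem.List.pyGet? s i with
    | some c => if c ∈ pvDigits then i else pvNdoLoopA s rest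
    | none => -1   -- Python raises IndexError here; such inputs lie outside Pre_find_pns

def next_digit_offset (s : List Char) (start_offset : Int) : Int :=
  pvNdoLoopA s (PySem.List.pyRange start_offset (s.length : Int) 1)

def pvFindA (s : List Char) (fuel : Nat) (start_offset : Int) (have_pns : Bool) : List Char :=
  match fuel with
  | 0 => []   -- fuel guard only; never reached from the wrapper's fuel on inputs in Pre_find_pns
  | fuel + 1 =>
    let s_len : Int := s.length
    let i0 : Int := start_offset - 1
    let vr : Bool :=
      match PySem.List.pyGet? s i0 with
      | some c => (PySem.Chars.lowerChar c == 'v' || PySem.Chars.lowerChar c == 'r')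
      | none => false   -- Python raises IndexError here; outside Pre_find_pns
    let i : Int := if vr then i0 - 1 else i0
    let sep_len : Int := if vr then 2 else 1
    let sep := PySem.List.slice s (some i) (some (i + sep_len))
    if sep ∉ pvNameSeps then
      if have_pns then
        let ndo_start := i + sep_len + 1
        if ndo_start ≥ s_len then []
        else
          let ndo := next_digit_offset s ndo_start
          if ndo = -1 ∨ ndo ≥ s_len then []
          else pvFindA s fuel ndo have_pns
      else if sep = ['.'] then sep
      else []
    else sep

def find_pns (s : String) (start_offset : Int) (have_pns : Bool) : String :=
  String.ofList (pvFindA s.toList (2 * s.toList.length + 2) start_offset have_pns)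

-- ===== PORT B =====
-- B's next_digit_offset: next((i for i in range(...) if s[i] is a digit), -1) = find? over the range
def next_digit_offset_alt (s : List Char) (start_offset : Int) : Int :=
  ((PySem.List.pyRange start_offset (s.length : Int) 1).find? (fun i =>
      match PySem.List.pyGet? s i with
      | some c => decide (c ∈ pvDigits)
      | none => false)).getD (-1)   -- a none (Python IndexError) lies outside Pre_find_pns

-- B's while-True loop: one tail-recursive pass threading start_offset, early returns in B's order
def pvLoopB (s : List Char) (have_pns : Bool) (fuel : Nat) (start_offset : Int) : List Char :=
  match fuel with
  | 0 => []   -- fuel guard only; never reached from the wrapper's fuel on inputs in Pre_find_pns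
  | fuel + 1 =>
    let s_len : Int := s.length
    let vr : Bool :=
      ((PySem.List.pyGet? s (start_offset - 1)).map (fun c =>
        PySem.Chars.lowerChar c == 'v' || PySem.Chars.lowerChar c == 'r')).getD false
    let i : Int := start_offset - 1 - (if vr then 1 else 0)
    let sep_len : Int := if vr then 2 else 1
    let sep := PySem.List.slice s (some i) (some (i + sep_len))
    if sep ∈ pvNameSeps then sep
    else if have_pns = false then (if sep = ['.'] then sep else [])
    else
      let ndo_start := i + sep_len + 1
      if ndo_start ≥ s_len then []
      else
        let ndo := next_digit_offset_alt s ndo_start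
        if ndo = -1 ∨ ndo ≥ s_len then []
        else pvLoopB s have_pns fuel ndo

def find_pns_alt (s : String) (start_offset : Int) (have_pns : Bool) : String :=
  String.ofList (pvLoopB s.toList have_pns (2 * s.toList.length + 2) start_offset)

-- ===== PRECONDITION & SPEC =====
-- Pre_ excludes exactly the inputs where A raises IndexError on s[start_offset - 1]
def Pre_find_pns (s : String) (start_offset : Int) (have_pns : Bool) : Prop :=
  -(s.toList.length : Int) ≤ start_offset - 1 ∧ start_offset - 1 < (s.toList.length : Int)
instance (s : String) (start_offset : Int) (have_pns : Bool) : Decidable (Pre_find_pns s start_offset have_pns) := by unfold Pre_find_pns; infer_instance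

def pvWitness_find_pns : String × Int × Bool := ("a-1", 2, false)

def Spec_find_pns (s : String) (start_offset : Int) (have_pns : Bool) (out : String) : Prop := out = find_pns_alt s start_offset have_pns
instance (s : String) (start_offset : Int) (have_pns : Bool) (out : String) : Decidable (Spec_find_pns s start_offset have_pns out) := by unfold Spec_find_pns; infer_instance

-- ===== CLAIM (what is proved, stated in full; the proofs are below) =====
def Claim_equal_find_pns : Prop := ∀ (s : String) (start_offset : Int) (have_pns : Bool), Dom_find_pns s start_offset have_pns → Pre_find_pns s start_offset have_pns → Spec_find_pns s start_offset have_pns (find_pns s start_offset have_pns)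

-- ===== LEMMAS AND PROOFS =====

-- B's scan result is an element of the range (or the -1 default): gives the loop-invariant bound on the new offset
theorem next_digit_offset_alt_bounds (s : List Char) (a : Int)
    (h : next_digit_offset_alt s a ≠ -1) :
    a ≤ next_digit_offset_alt s a ∧ next_digit_offset_alt s a < (s.length : Int) := by
  unfold next_digit_offset_alt at *
  cases hf : (PySem.List.pyRange a (s.length : Int) 1).find? (fun i =>
      match PySem.List.pyGet? s i with
      | some c => decide (c ∈ pvDigits)
      | none => false) with
  | none => rw [hf] at h; simp at h
  | some x =>
    simp only [Option.getD_some]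
    exact (PySem.List.mem_pyRange_one).1 (List.mem_of_find?_eq_some hf)

-- the two next_digit_offset ports agree on a list of indices at which s[i] never raises
theorem pvNdo_list_eq (s : List Char) (is : List Int)
    (hall : ∀ i ∈ is, (PySem.List.pyGet? s i).isSome) :
    pvNdoLoopA s is = (is.find? (fun i =>
      match PySem.List.pyGet? s i with
      | some c => decide (c ∈ pvDigits)
      | none => false)).getD (-1) := by
  induction is with
  | nil => rfl
  | cons i rest ih =>
    have hi : (PySem.List.pyGet? s i).isSome := hall i List.mem_cons_self
    cases hg : PySem.List.pyGet? s i with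
    | none => rw [hg] at hi; simp at hi
    | some c =>
      by_cases hd : c ∈ pvDigits
      · simp [pvNdoLoopA, hg, hd]
      · have hrest := ih (fun j hj => hall j (List.mem_cons_of_mem _ hj))
        simp [pvNdoLoopA, hg, hd, hrest]

theorem pvNdo_eq (s : List Char) (a : Int) (ha : -(s.length : Int) < a) :
    next_digit_offset s a = next_digit_offset_alt s a := by
  unfold next_digit_offset next_digit_offset_alt
  apply pvNdo_list_eq
  intro i hi
  rcases (PySem.List.mem_pyRange_one).1 hi with ⟨h1, h2⟩
  rw [Option.isSome_iff_ne_none]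
  intro hn
  have hir := (PySem.List.pyGet?_eq_none_iff s i).1 hn
  simp [PySem.Raise.InRange] at hir
  omega

theorem pvFindA_eq_pvLoopB (fuel : Nat) : ∀ (s : List Char) (o : Int) (h : Bool),
    1 - (s.length : Int) ≤ o →
    pvFindA s fuel o h = pvLoopB s h fuel o := by
  induction fuel with
  | zero => intro s o h _; rfl
  | succ fuel ih =>
    intro s o h hpre
    rw [pvFindA, pvLoopB]
    cases hg : PySem.List.pyGet? s (o - 1) with
    | none =>
      simp only [Option.map_none, Option.getD_none, Bool.false_eq_true, if_false, sub_zero]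
      rw [pvNdo_eq s _ (by omega)]
      split_ifs <;> first
        | rfl
        | (rcases next_digit_offset_alt_bounds s (o - 1 + 1 + 1) (by tauto) with ⟨hb1, hb2⟩
           exact ih s (next_digit_offset_alt s (o - 1 + 1 + 1)) h (by omega))
        | (cases h <;> contradiction)
    | some c =>
      by_cases hv : (PySem.Chars.lowerChar c == 'v' || PySem.Chars.lowerChar c == 'r') = true
      · simp only [Option.map_some, Option.getD_some, hv, if_true]
        rw [pvNdo_eq s _ (by omega)]
        split_ifs <;> first
          | rfl
          | (rcases next_digit_offset_alt_bounds s (o - 1 - 1 + 2 + 1) (by tauto) with ⟨hb1, hb2⟩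
             exact ih s (next_digit_offset_alt s (o - 1 - 1 + 2 + 1)) h (by omega))
          | (cases h <;> contradiction)
      · simp only [Option.map_some, Option.getD_some, Bool.not_eq_true] at hv ⊢
        simp only [hv, Bool.false_eq_true, if_false, sub_zero]
        rw [pvNdo_eq s _ (by omega)]
        split_ifs <;> first
          | rfl
          | (rcases next_digit_offset_alt_bounds s (o - 1 + 1 + 1) (by tauto) with ⟨hb1, hb2⟩
             exact ih s (next_digit_offset_alt s (o - 1 + 1 + 1)) h (by omega))
          | (cases h <;> contradiction)

-- ===== VERDICT (by name: the statement is the Claim_ definition above) =====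
theorem find_pns_spec : Claim_equal_find_pns := by
  intro s o h _hdom hpre
  unfold Spec_find_pns find_pns find_pns_alt
  rcases hpre with ⟨h1, h2⟩
  congr 1
  exact pvFindA_eq_pvLoopB (2 * s.toList.length + 2) s.toList o h (by omega)
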